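-- pv_equiv track=rewrite | github.com/Skyscimitar/RIW | cacm_part1/DocumentParser.py | calculate_vocabulary
-- ===== SOURCE A (Python) =====
-- def calculate_vocabulary(tokens):
--     """This function creates a vocabulary from the dictionnary.
--     :return: vocab, a dictionnary of distinct words
--     :return: vocab_lengths, the number of occurence of each word in vocab
--     """
--
--     vocab = {}
--     vocab_lengths = []
--     for key in tokens.keys():
--         for word in tokens[key]:
--             if word not in vocab.keys():
--                 vocab[word] = 1
--             else:
--                 vocab[word] +=1
--         vocab_lengths.append(len(vocab.keys()))
--     return vocab , vocab_lengths
-- ===== SOURCE B (Python) =====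
-- def calculate_vocabulary(tokens):
--     """Two-pass reimplementation: pass 1 builds the word-count dict over all
--     documents; pass 2 tracks the running set of distinct words and records its
--     size after each document."""
--     vocab = {}
--     for words in tokens.values():
--         for word in words:
--             vocab[word] = vocab.get(word, 0) + 1
--     vocab_lengths = []
--     seen = set()
--     for words in tokens.values():
--         seen.update(words)
--         vocab_lengths.append(len(seen))
--     return vocab, vocab_lengths
-- ===== Notes on version B (the rewrite author's own statement) =====
-- stated objective: simpler
-- what changed: Single stateful loop building the counts dict and the lengths list together is split into two independent passes: one dict.get-based counting pass, and one pass over a running set of distinct words whose size after each document gives vocab_lengths.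
import Mathlib
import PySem

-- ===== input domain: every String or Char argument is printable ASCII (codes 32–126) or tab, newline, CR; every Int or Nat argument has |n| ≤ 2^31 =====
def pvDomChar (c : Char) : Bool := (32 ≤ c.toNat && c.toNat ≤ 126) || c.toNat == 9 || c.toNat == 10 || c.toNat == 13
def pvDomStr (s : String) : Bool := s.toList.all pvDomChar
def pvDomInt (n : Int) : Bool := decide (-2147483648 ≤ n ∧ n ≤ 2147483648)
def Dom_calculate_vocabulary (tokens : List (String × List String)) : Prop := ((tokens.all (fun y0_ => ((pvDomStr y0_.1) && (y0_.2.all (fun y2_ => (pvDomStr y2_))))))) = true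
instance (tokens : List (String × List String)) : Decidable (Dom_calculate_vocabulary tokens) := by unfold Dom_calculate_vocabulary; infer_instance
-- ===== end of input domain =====

-- B splits A's single stateful loop into two independent passes (a counting pass,
-- then a running-set pass for the cumulative distinct-word counts); objective: simpler.


-- ===== PORT A =====
-- inner loop body: 'if word not in vocab.keys(): vocab[word] = 1 else: vocab[word] += 1'
def pvAWordStep (v : PySem.Dict String Int) (w : String) : PySem.Dict String Int :=
  if v.contains w = false then v.insert w 1 else v.modify w 0 (· + 1)

def calculate_vocabulary (tokens : List (String × List String)) : (List (String × Int)) × List Int :=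
  -- the Python parameter is a dict; the association list is its insertion sequence
  let d := PySem.Dict.ofList tokens
  let fin := d.items.foldl
    (fun (st : PySem.Dict String Int × List Int) kv =>
      let vocab := kv.2.foldl pvAWordStep st.1
      (vocab, st.2 ++ [(vocab.size : Int)]))
    (PySem.Dict.empty, [])
  (fin.1.items, fin.2)

-- ===== PORT B =====
def calculate_vocabulary_alt (tokens : List (String × List String)) : (List (String × Int)) × List Int :=
  let d := PySem.Dict.ofList tokens
  let vocab := d.values.foldl
    (fun (v : PySem.Dict String Int) ws =>
      ws.foldl (fun v w => v.insert w (v.getD w 0 + 1)) v)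
    PySem.Dict.empty
  let lens := (d.values.foldl
    (fun (st : PySem.Set String × List Int) ws =>
      let seen := PySem.Set.update st.1 ws
      (seen, st.2 ++ [PySem.Set.len seen]))
    (PySem.Set.empty, [])).2
  (vocab.items, lens)

-- ===== PRECONDITION & SPEC =====
def Spec_calculate_vocabulary (tokens : List (String × List String)) (out : (List (String × Int)) × List Int) : Prop := out = calculate_vocabulary_alt tokens
instance (tokens : List (String × List String)) (out : (List (String × Int)) × List Int) : Decidable (Spec_calculate_vocabulary tokens out) := by unfold Spec_calculate_vocabulary; infer_instance

-- ===== CLAIM (what is proved, stated in full; the proofs are below) =====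
def Claim_equal_calculate_vocabulary : Prop := ∀ (tokens : List (String × List String)), Dom_calculate_vocabulary tokens → Spec_calculate_vocabulary tokens (calculate_vocabulary tokens)

-- ===== LEMMAS AND PROOFS =====

-- A's branching word step is B's unconditional counter step.
theorem pvAWordStep_eq (v : PySem.Dict String Int) (w : String) :
    pvAWordStep v w = v.insert w (v.getD w 0 + 1) := by
  unfold pvAWordStep
  by_cases h : v.contains w = false
  · rw [if_pos h, PySem.Dict.getD_of_not_contains v 0 h, zero_add]
  · simp [h]
    rfl

theorem pvAWordStep_funext :
    pvAWordStep = fun (v : PySem.Dict String Int) w => v.insert w (v.getD w 0 + 1) := by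
  funext v w; exact pvAWordStep_eq v w

-- A's paired fold: first component is B's counting fold.
theorem pvFold_fst (L : List (String × List String)) (v : PySem.Dict String Int) (acc : List Int) :
    (L.foldl (fun (st : PySem.Dict String Int × List Int) kv =>
        (List.foldl (fun v w => v.insert w (v.getD w 0 + 1)) st.1 kv.2,
          st.2 ++ [((List.foldl (fun v w => v.insert w (v.getD w 0 + 1)) st.1 kv.2).size : Int)])) (v, acc)).1
      = L.foldl (fun v kv => List.foldl (fun v w => v.insert w (v.getD w 0 + 1)) v kv.2) v := by
  induction L generalizing v acc with
  | nil => rfl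
  | cons kv L ih => simpa using ih _ _

-- A's paired fold: second component is B's running-set fold, under the invariant seen = vocab.keys.
theorem pvFold_snd (L : List (String × List String)) (v : PySem.Dict String Int)
    (s : PySem.Set String) (acc : List Int) (hs : s = v.keys) :
    (L.foldl (fun (st : PySem.Dict String Int × List Int) kv =>
        (List.foldl (fun v w => v.insert w (v.getD w 0 + 1)) st.1 kv.2,
          st.2 ++ [((List.foldl (fun v w => v.insert w (v.getD w 0 + 1)) st.1 kv.2).size : Int)])) (v, acc)).2
      = ((L.map (·.2)).foldl (fun (st : PySem.Set String × List Int) ws =>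
          (PySem.Set.update st.1 ws, st.2 ++ [PySem.Set.len (PySem.Set.update st.1 ws)])) (s, acc)).2 := by
  induction L generalizing v s acc with
  | nil => rfl
  | cons kv L ih =>
    simp only [List.foldl_cons, List.map_cons]
    have hkeys : PySem.Set.update s kv.2
        = (List.foldl (fun v w => v.insert w (v.getD w 0 + 1)) v kv.2).keys := by
      rw [hs]; exact (PySem.Dict.keys_foldl_insert kv.2 (fun d x => d.getD x 0 + 1) v).symm
    rw [ih _ _ _ hkeys]
    congr 2
    rw [hkeys]
    simp [PySem.Set.len, PySem.Dict.size, PySem.Dict.keys]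

-- ===== VERDICT (by name: the statement is the Claim_ definition above) =====
theorem calculate_vocabulary_spec : Claim_equal_calculate_vocabulary := by
  intro tokens _
  unfold Spec_calculate_vocabulary calculate_vocabulary calculate_vocabulary_alt
  rw [pvAWordStep_funext]
  simp only [Prod.mk.injEq]
  refine ⟨?_, ?_⟩
  · rw [pvFold_fst (v := PySem.Dict.empty) (acc := [])]
    rw [show (PySem.Dict.ofList tokens).values = (PySem.Dict.ofList tokens).items.map (·.2) from rfl]
    rw [List.foldl_map]
  · rw [pvFold_snd _ PySem.Dict.empty PySem.Set.empty [] rfl]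
    rw [show (PySem.Dict.ofList tokens).values = (PySem.Dict.ofList tokens).items.map (·.2) from rfl]
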